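-- pv_equiv track=rewrite | github.com/aliya-singh/cocobot | utils/search.py | keyword_search
-- ===== SOURCE A (Python) =====
-- from typing import Dict, List, Tuple
--
-- def keyword_search(query: str, documents: Dict[str, str], limit: int = 5) -> str:
--     """Simple keyword search in documents"""
--     if not documents:
--         return ""
--
--     query_words = query.lower().split()
--     results = []
--
--     for doc_name, doc_text in documents.items():
--         doc_lower = doc_text.lower()
--
--         # Check if query words are in document
--         matches = sum(1 for word in query_words if word in doc_lower)
--
--         if matches > 0:
--             # Extract relevant lines
--             lines = doc_text.split('\n')
--             relevant_lines = [
--                 line for line in lines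
--                 if any(word in line.lower() for word in query_words)
--             ]
--
--             if relevant_lines:
--                 snippet = ' '.join(relevant_lines[:3])[:300]
--                 results.append((doc_name, snippet, matches))
--
--     # Sort by relevance
--     results.sort(key=lambda x: x[2], reverse=True)
--
--     # Format output
--     if results:
--         context = "KNOWLEDGE BASE RESULTS:\n"
--         for doc_name, snippet, _ in results[:limit]:
--             context += f"\n[{doc_name}]\n{snippet}\n"
--         return context
--
--     return ""
-- ===== SOURCE B (Python) =====
-- def keyword_search(query: str, documents, limit: int = 5) -> str:
--     """Keyword search: one pass over each document's lines; rank by bucket selection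
--     over the distinct match counts (stable, highest first) instead of a full sort."""
--     query_words = query.lower().split()
--     results = []
--     for doc_name, doc_text in documents.items():
--         relevant, lowered = [], []
--         for line in doc_text.split('\n'):
--             ll = line.lower()
--             if any(w in ll for w in query_words):
--                 relevant.append(line)
--                 lowered.append(ll)
--         if relevant:
--             matches = sum(1 for w in query_words if any(w in ll for ll in lowered))
--             snippet = ' '.join(relevant[:3])[:300]
--             results.append((doc_name, snippet, matches))
--     if not results:
--         return ""
--     ordered = []
--     for m in sorted({r[2] for r in results}, reverse=True):
--         ordered += [r for r in results if r[2] == m]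
--     out = "KNOWLEDGE BASE RESULTS:\n"
--     for doc_name, snippet, _ in ordered[:limit]:
--         out += f"\n[{doc_name}]\n{snippet}\n"
--     return out
-- ===== Notes on version B (the rewrite author's own statement) =====
-- stated objective: alternative
-- what changed: Each document is processed in one pass over its lowercased lines (the match count is derived from the relevant lines instead of a separate whole-text membership scan per query word), and results are ranked by a stable bucket selection over the distinct match counts (highest first) instead of sorting the whole result list.
import Mathlib
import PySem

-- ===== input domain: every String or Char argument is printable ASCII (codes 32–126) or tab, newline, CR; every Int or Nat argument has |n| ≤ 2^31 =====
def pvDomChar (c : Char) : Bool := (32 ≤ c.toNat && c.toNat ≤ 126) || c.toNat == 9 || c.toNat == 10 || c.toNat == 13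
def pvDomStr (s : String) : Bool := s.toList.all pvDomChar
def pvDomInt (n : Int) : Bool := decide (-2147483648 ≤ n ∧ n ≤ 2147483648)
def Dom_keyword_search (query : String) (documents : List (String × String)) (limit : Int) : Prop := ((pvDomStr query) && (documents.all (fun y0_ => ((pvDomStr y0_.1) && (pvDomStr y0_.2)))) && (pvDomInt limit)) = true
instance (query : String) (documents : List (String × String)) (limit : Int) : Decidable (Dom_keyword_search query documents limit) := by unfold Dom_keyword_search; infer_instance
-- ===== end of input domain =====

-- B re-decomposes A's work: one pass over each document's lines (the match count read off
-- the relevant lines instead of a separate whole-text scan) and ranking by stable bucket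
-- selection over the distinct match counts instead of a full sort; objective: alternative.

-- ===== PORT A =====
-- documents is a Python dict; per the type convention the list is read through PySem.Dict
-- (insertion order, duplicate keys overwritten in place) before `.items()` is iterated.
-- doc_text.split('\n') is PySem.Chars.splitOn on the code points (split? with a nonempty
-- separator), mapped back to String.
def keyword_search (query : String) (documents : List (String × String)) (limit : Int) : String :=
  let d := PySem.Dict.ofList documents
  if d.items.isEmpty then "" else
    let query_words := PySem.Str.split₀ (PySem.Str.lower query)
    let results := d.items.foldl (fun results p =>
      let doc_lower := PySem.Str.lower p.2
      let nmatches := ((query_words.filter (fun word => PySem.Str.isIn word doc_lower)).map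
        (fun _ => (1 : Int))).sum
      if 0 < nmatches then
        let lines := (PySem.Chars.splitOn p.2.toList ['\n']).map String.ofList
        let relevant_lines := lines.filter
          (fun line => query_words.any (fun word => PySem.Str.isIn word (PySem.Str.lower line)))
        if relevant_lines.isEmpty then results
        else results ++ [(p.1,
          PySem.Str.slice (PySem.Str.join " " (PySem.List.slice relevant_lines none (some 3))) none (some 300),
          nmatches)]
      else results) []
    let sorted_results := PySem.List.sorted results (fun x => x.2.2) true
    if sorted_results.isEmpty then ""
    else (PySem.List.slice sorted_results none (some limit)).foldl
      (fun context r => context ++ "\n[" ++ r.1 ++ "]\n" ++ r.2.1 ++ "\n")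
      "KNOWLEDGE BASE RESULTS:\n"

-- ===== PORT B =====
def keyword_search_alt (query : String) (documents : List (String × String)) (limit : Int) : String :=
  let query_words := PySem.Str.split₀ (PySem.Str.lower query)
  let results := (PySem.Dict.ofList documents).items.foldl (fun results p =>
    let rl := ((PySem.Chars.splitOn p.2.toList ['\n']).map String.ofList).foldl
      (fun rl line =>
        let ll := PySem.Str.lower line
        if query_words.any (fun w => PySem.Str.isIn w ll) then (rl.1 ++ [line], rl.2 ++ [ll])
        else rl)
      ([], [])
    if rl.1.isEmpty then results
    else
      let nmatches := ((query_words.filter (fun w => rl.2.any (fun ll => PySem.Str.isIn w ll))).map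
        (fun _ => (1 : Int))).sum
      results ++ [(p.1,
        PySem.Str.slice (PySem.Str.join " " (PySem.List.slice rl.1 none (some 3))) none (some 300),
        nmatches)]) []
  if results.isEmpty then ""
  else
    let ordered := (PySem.List.sorted (PySem.Set.ofList (results.map (fun r => r.2.2)))
        (fun m => m) true).foldl
      (fun ordered m => ordered ++ results.filter (fun r => r.2.2 == m)) []
    (PySem.List.slice ordered none (some limit)).foldl
      (fun out r => out ++ "\n[" ++ r.1 ++ "]\n" ++ r.2.1 ++ "\n")
      "KNOWLEDGE BASE RESULTS:\n"

-- ===== PRECONDITION & SPEC =====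
def Spec_keyword_search (query : String) (documents : List (String × String)) (limit : Int) (out : String) : Prop := out = keyword_search_alt query documents limit
instance (query : String) (documents : List (String × String)) (limit : Int) (out : String) : Decidable (Spec_keyword_search query documents limit out) := by unfold Spec_keyword_search; infer_instance

-- ===== CLAIM (what is proved, stated in full; the proofs are below) =====
def Claim_equal_keyword_search : Prop := ∀ (query : String) (documents : List (String × String)) (limit : Int), Dom_keyword_search query documents limit → Spec_keyword_search query documents limit (keyword_search query documents limit)

-- ===== LEMMAS AND PROOFS =====

def pvSplit1 : List Char → List (List Char)
  | [] => [[]]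
  | c :: t =>
    if c = '\n' then [] :: pvSplit1 t
    else
      match pvSplit1 t with
      | [] => [[c]]
      | h :: r => (c :: h) :: r

theorem pvSplit1_ne_nil (cs : List Char) : pvSplit1 cs ≠ [] := by
  induction cs with
  | nil => simp [pvSplit1]
  | cons c t ih =>
    simp only [pvSplit1]
    split_ifs with h
    · simp
    · cases hs : pvSplit1 t <;> simp

theorem pv_go_eq (l : List Char) : ∀ (fuel : Nat), l.length < fuel → ∀ (cur : List Char) (acc : List (List Char)),
    PySem.Chars.splitOn.go ['\n'] fuel l cur acc =
      acc.reverse ++ (match pvSplit1 l with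
        | [] => []
        | h :: r => (cur.reverse ++ h) :: r) := by
  induction l with
  | nil =>
    intro fuel hf cur acc
    match fuel, hf with
    | fuel+1, _ => simp [PySem.Chars.splitOn.go, pvSplit1]
  | cons c rest ih =>
    intro fuel hf cur acc
    match fuel, hf with
    | fuel+1, hf =>
      rw [PySem.Chars.splitOn.go.eq_def]
      simp only []
      by_cases hc : c = '\n'
      · subst hc
        have hp : List.isPrefixOf ['\n'] ('\n' :: rest) = true := by simp [List.isPrefixOf]
        simp only [hp, if_pos]
        have hdrop : List.drop (['\n'] : List Char).length ('\n' :: rest) = rest := rfl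
        rw [hdrop, ih fuel (by simpa using hf) [] (cur.reverse :: acc)]
        have hne := pvSplit1_ne_nil rest
        cases hs : pvSplit1 rest with
        | nil => exact absurd hs hne
        | cons h r => simp [pvSplit1, hs]
      · have hp : List.isPrefixOf ['\n'] (c :: rest) = false := by
          simp [List.isPrefixOf]
          exact fun h => absurd h.symm hc
        simp only [hp, if_neg, Bool.false_eq_true, not_false_iff]
        rw [ih fuel (by simpa using hf) (c :: cur) acc]
        have hne := pvSplit1_ne_nil rest
        cases hs : pvSplit1 rest with
        | nil => exact absurd hs hne
        | cons h r => simp [pvSplit1, hs, hc]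

theorem pv_splitOn_eq_split1 (cs : List Char) :
    PySem.Chars.splitOn cs ['\n'] = pvSplit1 cs := by
  show PySem.Chars.splitOn.go ['\n'] (cs.length + 1) cs [] [] = _
  rw [pv_go_eq cs (cs.length + 1) (by omega) [] []]
  have hne := pvSplit1_ne_nil cs
  cases hs : pvSplit1 cs with
  | nil => exact absurd hs hne
  | cons h r => simp

theorem pvSplit1_head (cs : List Char) :
    ∃ h r, pvSplit1 cs = h :: r ∧ '\n' ∉ h ∧ h <+: cs ∧
      (∀ w : List Char, w <+: cs → '\n' ∉ w → w <+: h) := by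
  induction cs with
  | nil =>
    exact ⟨[], [], by simp [pvSplit1], by simp, by simp, fun w hw _ => by simpa using hw⟩
  | cons c t ih =>
    obtain ⟨h, r, hs, hnl, hpre, huniq⟩ := ih
    by_cases hc : c = '\n'
    · subst hc
      refine ⟨[], pvSplit1 t, by simp [pvSplit1], by simp, by simp, ?_⟩
      intro w hw hwn
      cases w with
      | nil => simp
      | cons a w' =>
        obtain ⟨rest, hrest⟩ := hw
        simp only [List.cons_append, List.cons.injEq] at hrest
        exact absurd (by simp [hrest.1]) hwn
    · refine ⟨c :: h, r, by simp [pvSplit1, hs, hc], by simp [hnl]; exact fun h => absurd h.symm hc, by simpa using hpre, ?_⟩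
      intro w hw hwn
      cases w with
      | nil => simp
      | cons a w' =>
        obtain ⟨rest, hrest⟩ := hw
        simp only [List.cons_append, List.cons.injEq] at hrest
        obtain ⟨ha, ht⟩ := hrest
        subst ha
        have : w' <+: h := huniq w' ⟨rest, ht⟩ (by simp at hwn; tauto)
        simpa using this

theorem pv_infix_split1 (w : List Char) (hw : '\n' ∉ w) : ∀ (cs : List Char),
    w <:+: cs ↔ ∃ p ∈ pvSplit1 cs, w <:+: p := by
  intro cs
  induction cs with
  | nil =>
    simp [pvSplit1]
  | cons c t ih =>
    by_cases hc : c = '\n'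
    · subst hc
      rw [List.infix_cons_iff]
      constructor
      · rintro (hpre | hinf)
        · -- w prefix of '\n'::t with no '\n' → w = []
          have : w = [] := by
            cases w with
            | nil => rfl
            | cons a w' =>
              obtain ⟨rest, hrest⟩ := hpre
              simp only [List.cons_append, List.cons.injEq] at hrest
              exact absurd (by simp [hrest.1]) hw
          subst this
          exact ⟨[], by simp [pvSplit1]⟩
        · obtain ⟨p, hp, hwp⟩ := ih.mp hinf
          exact ⟨p, by simp [pvSplit1, hp], hwp⟩
      · rintro ⟨p, hp, hwp⟩
        rw [show pvSplit1 ('\n' :: t) = [] :: pvSplit1 t from by simp [pvSplit1]] at hp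
        rcases List.mem_cons.mp hp with rfl | hp
        · simp at hwp; simp [hwp]
        · exact Or.inr (ih.mpr ⟨p, hp, hwp⟩)
    · obtain ⟨h, r, hs, hnl, hpre, huniq⟩ := pvSplit1_head t
      have hsplit : pvSplit1 (c :: t) = (c :: h) :: r := by simp [pvSplit1, hs, hc]
      rw [List.infix_cons_iff, hsplit]
      constructor
      · rintro (hpfx | hinf)
        · refine ⟨c :: h, by simp, ?_⟩
          cases w with
          | nil => simp
          | cons a w' =>
            obtain ⟨rest, hrest⟩ := hpfx
            simp only [List.cons_append, List.cons.injEq] at hrest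
            obtain ⟨rfl, ht⟩ := hrest
            have : w' <+: h := huniq w' ⟨rest, ht⟩ (by simp at hw; tauto)
            obtain ⟨u, hu⟩ := this
            have hpp : a :: w' <+: a :: h := ⟨u, by simp [hu]⟩
            exact hpp.isInfix
        · obtain ⟨p, hp, hwp⟩ := ih.mp hinf
          rw [hs] at hp
          rcases List.mem_cons.mp hp with rfl | hp
          · exact ⟨c :: p, by simp, hwp.trans (List.suffix_cons c p).isInfix⟩ -- w infix h ≤ c::h
          · exact ⟨p, by simp [hp], hwp⟩
      · rintro ⟨p, hp, hwp⟩
        rcases List.mem_cons.mp hp with rfl | hp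
        · -- w infix of c::h, and c::h infix of c::t since h <+: t
          have hch : (c :: h) <+: (c :: t) := by
            obtain ⟨u, hu⟩ := hpre
            exact ⟨u, by simp [hu]⟩
          exact List.infix_cons_iff.mp (hwp.trans hch.isInfix)
        · -- p ∈ r: w infix p, p infix t via ih backward
          exact Or.inr (ih.mpr ⟨p, by simp [hs, hp], hwp⟩)

theorem pv_lowerChar_eq_nl (c : Char) : PySem.Chars.lowerChar c = '\n' ↔ c = '\n' := by
  unfold PySem.Chars.lowerChar
  split_ifs with h
  · constructor
    · intro he
      exfalso
      unfold PySem.Chars.isupper at h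
      simp only [Bool.and_eq_true, decide_eq_true_eq] at h
      have h1 : 65 ≤ c.toNat := h.1
      have h2 : c.toNat ≤ 90 := h.2
      have : (Char.ofNat (c.toNat + 32)).toNat = c.toNat + 32 := by
        unfold Char.ofNat
        split
        · rfl
        · rename_i hn
          exact absurd (Or.inl (by omega : c.toNat + 32 < 0xD800)) hn
      rw [he] at this
      have h10 : ('\n').toNat = 10 := rfl
      omega
    · intro he; subst he; simp [PySem.Chars.isupper] at h
  · exact Iff.rfl

theorem pvSplit1_map_lower (cs : List Char) :
    pvSplit1 (PySem.Chars.lower cs) = (pvSplit1 cs).map PySem.Chars.lower := by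
  induction cs with
  | nil => simp [pvSplit1, PySem.Chars.lower]
  | cons c t ih =>
    simp only [PySem.Chars.lower, List.map_cons] at *
    by_cases hc : c = '\n'
    · subst hc
      rw [show PySem.Chars.lowerChar '\n' = '\n' from (pv_lowerChar_eq_nl '\n').mpr rfl]
      simp [pvSplit1, ih, PySem.Chars.lower]
    · have hlc : ¬ PySem.Chars.lowerChar c = '\n' := fun h => hc ((pv_lowerChar_eq_nl c).mp h)
      have hne := pvSplit1_ne_nil t
      cases hs : pvSplit1 t with
      | nil => exact absurd hs hne
      | cons h r =>
        rw [hs] at ih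
        simp only [pvSplit1, if_neg hc, if_neg hlc, hs, ih]
        simp [PySem.Chars.lower]

theorem pv_split₀_go_no_space (s : List Char) : ∀ (cur : List Char) (acc : List (List Char)),
    (∀ c ∈ cur, PySem.Chars.isspace c = false) →
    (∀ p ∈ acc, ∀ c ∈ p, PySem.Chars.isspace c = false) →
    ∀ w ∈ PySem.Chars.split₀.go s cur acc, ∀ c ∈ w, PySem.Chars.isspace c = false := by
  induction s with
  | nil =>
    intro cur acc hcur hacc w hw c hc
    rw [PySem.Chars.split₀.go.eq_def] at hw
    simp only [] at hw
    split_ifs at hw with h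
    · simp at hw
      exact hacc w hw c hc
    · simp at hw
      rcases hw with hw | rfl
      · exact hacc w hw c hc
      · exact hcur c (by simpa using hc)
  | cons a rest ih =>
    intro cur acc hcur hacc w hw c hc
    rw [PySem.Chars.split₀.go.eq_def] at hw
    simp only [] at hw
    split_ifs at hw with h1 h2
    · exact ih [] acc (by simp) hacc w hw c hc
    · refine ih [] (cur.reverse :: acc) (by simp) ?_ w hw c hc
      intro p hp d hd
      rcases List.mem_cons.mp hp with rfl | hp
      · exact hcur d (by simpa using hd)
      · exact hacc p hp d hd
    · refine ih (a :: cur) acc ?_ hacc w hw c hc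
      intro d hd
      rcases List.mem_cons.mp hd with rfl | hd
      · simpa using h1
      · exact hcur d hd

theorem pv_split₀_no_space (s : List Char) (w : List Char) (hw : w ∈ PySem.Chars.split₀ s)
    (c : Char) (hc : c ∈ w) : PySem.Chars.isspace c = false :=
  pv_split₀_go_no_space s [] [] (by simp) (by simp) w hw c hc

theorem pv_word_in_doc_iff (w text : String)
    (hw : ∀ c ∈ w.toList, PySem.Chars.isspace c = false) :
    (PySem.Str.isIn w (PySem.Str.lower text) = true ↔
      ∃ line ∈ (PySem.Chars.splitOn text.toList ['\n']).map String.ofList,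
        PySem.Str.isIn w (PySem.Str.lower line) = true) := by
  have hnl : '\n' ∉ w.toList := by
    intro h
    have := hw '\n' h
    simp [PySem.Chars.isspace] at this
  rw [PySem.Str.isIn_iff_infix]
  rw [show (PySem.Str.lower text).toList = PySem.Chars.lower text.toList from PySem.Str.toList_lower text]
  rw [show PySem.Chars.lower text.toList = PySem.Chars.lower text.toList from rfl]
  have step1 : w.toList <:+: PySem.Chars.lower text.toList ↔
      ∃ p ∈ pvSplit1 (PySem.Chars.lower text.toList), w.toList <:+: p :=
    pv_infix_split1 w.toList hnl _
  rw [step1, pvSplit1_map_lower, pv_splitOn_eq_split1]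
  constructor
  · rintro ⟨p, hp, hwp⟩
    obtain ⟨l, hl, rfl⟩ := List.mem_map.mp hp
    refine ⟨String.ofList l, List.mem_map_of_mem hl, ?_⟩
    · rw [PySem.Str.isIn_iff_infix]
      simpa [PySem.Str.toList_lower, String.toList_ofList] using hwp
  · rintro ⟨line, hline, hin⟩
    obtain ⟨l, hl, rfl⟩ := List.mem_map.mp hline
    refine ⟨PySem.Chars.lower l, List.mem_map_of_mem hl, ?_⟩
    rw [PySem.Str.isIn_iff_infix] at hin
    simpa [PySem.Str.toList_lower, String.toList_ofList] using hin

theorem pv_insertBy_all_before {α : Type} (before : α → α → Bool) (x : α) (ys : List α)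
    (h : ∀ y ∈ ys, before x y = true) : PySem.List.insertBy before x ys = x :: ys := by
  cases ys with
  | nil => rfl
  | cons y ys =>
    show (if before x y = true then x :: y :: ys else y :: PySem.List.insertBy before x ys) = _
    rw [if_pos (h y (by simp))]

theorem pv_insertBy_append_skip {α : Type} (before : α → α → Bool) (x : α) (A B : List α)
    (h : ∀ y ∈ A, before x y = false) :
    PySem.List.insertBy before x (A ++ B) = A ++ PySem.List.insertBy before x B := by
  induction A with
  | nil => rfl
  | cons a A ih =>
    show (if before x a = true then _ else a :: PySem.List.insertBy before x (A ++ B)) = _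
    rw [if_neg (by simp [h a (by simp)]), ih (fun y hy => h y (by simp [hy]))]
    rfl

theorem pv_bucket_sort {α : Type} (key : α → Int) (K : List Int) (rs : List α)
    (hK : K.Pairwise (fun a b => b < a)) (hmem : ∀ x ∈ rs, key x ∈ K) :
    K.flatMap (fun m => rs.filter (fun x => key x == m)) = PySem.List.sorted rs key true := by
  rw [PySem.List.sorted_rev_eq_foldl_insertBy]
  induction rs using List.reverseRecOn with
  | nil => simp
  | append_singleton t x ih =>
    have ht : ∀ y ∈ t, key y ∈ K := fun y hy => hmem y (by simp [hy])
    have hx : key x ∈ K := hmem x (by simp)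
    rw [List.foldl_append, List.foldl_cons, List.foldl_nil, ← ih ht]
    obtain ⟨K1, K2, rfl⟩ := List.append_of_mem hx
    -- keys in K1 are > key x, keys in K2 are < key x
    have hK1 : ∀ m ∈ K1, key x < m := by
      intro m hm
      have := (List.pairwise_append.mp hK).2.2 m hm (key x) (by simp)
      exact this
    have hK2 : ∀ m ∈ K2, m < key x := by
      have := (List.pairwise_append.mp hK).2.1
      intro m hm
      exact (List.pairwise_cons.mp this).1 m hm
    -- filters over t ++ [x]
    have hfilt : ∀ m : Int, (t ++ [x]).filter (fun y => key y == m) =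
        t.filter (fun y => key y == m) ++ (if key x = m then [x] else []) := by
      intro m
      rw [List.filter_append]
      congr 1
      by_cases h : key x = m <;> simp [h]
    have hflat : ∀ (L : List Int), (∀ m ∈ L, key x ≠ m) →
        L.flatMap (fun m => (t ++ [x]).filter (fun y => key y == m)) =
        L.flatMap (fun m => t.filter (fun y => key y == m)) := by
      intro L hL
      induction L with
      | nil => rfl
      | cons m L ihL =>
        simp only [List.flatMap_cons, hfilt m, if_neg (hL m (by simp)),
          List.append_nil, ihL (fun m' hm' => hL m' (by simp [hm']))]
    -- split the flatMap at the bucket of key x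
    rw [List.flatMap_append, List.flatMap_cons,
        hflat K1 (fun m hm => ne_of_lt (hK1 m hm)) ,
        hfilt (key x), if_pos rfl,
        hflat K2 (fun m hm => (ne_of_lt (hK2 m hm)).symm),
        List.flatMap_append, List.flatMap_cons]
    -- now show insertBy lands exactly after the key-x bucket
    have hnb1 : ∀ y ∈ K1.flatMap (fun m => t.filter (fun z => key z == m)) ++
        t.filter (fun z => key z == key x), (fun a b => decide (key b < key a)) x y = false := by
      intro y hy
      rcases List.mem_append.mp hy with hy | hy
      · obtain ⟨m, hm, hyf⟩ := List.mem_flatMap.mp hy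
        have : key y = m := by simpa using (List.mem_filter.mp hyf).2
        simp only [decide_eq_false_iff_not, not_lt, this]
        exact le_of_lt (hK1 m hm)
      · have : key y = key x := by simpa using (List.mem_filter.mp hy).2
        simp [this]
    have hb2 : ∀ y ∈ K2.flatMap (fun m => t.filter (fun z => key z == m)),
        (fun a b => decide (key b < key a)) x y = true := by
      intro y hy
      obtain ⟨m, hm, hyf⟩ := List.mem_flatMap.mp hy
      have : key y = m := by simpa using (List.mem_filter.mp hyf).2
      simp only [decide_eq_true_eq, this]
      exact hK2 m hm
    rw [show K1.flatMap (fun m => t.filter (fun z => key z == m)) ++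
        (t.filter (fun z => key z == key x) ++ K2.flatMap (fun m => t.filter (fun z => key z == m))) =
        (K1.flatMap (fun m => t.filter (fun z => key z == m)) ++ t.filter (fun z => key z == key x)) ++
        K2.flatMap (fun m => t.filter (fun z => key z == m)) from by simp,
      pv_insertBy_append_skip _ x _ _ hnb1, pv_insertBy_all_before _ x _ hb2]
    simp

theorem pv_relfold (qws : List String) (lines : List String) :
    ∀ (a1 a2 : List String),
    lines.foldl (fun rl line =>
        let ll := PySem.Str.lower line
        if qws.any (fun w => PySem.Str.isIn w ll) then (rl.1 ++ [line], rl.2 ++ [ll]) else rl)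
      (a1, a2) =
    (a1 ++ lines.filter (fun line => qws.any (fun w => PySem.Str.isIn w (PySem.Str.lower line))),
     a2 ++ (lines.filter (fun line => qws.any (fun w => PySem.Str.isIn w (PySem.Str.lower line)))).map PySem.Str.lower) := by
  induction lines with
  | nil => simp
  | cons line rest ih =>
    intro a1 a2
    simp only [List.foldl_cons]
    by_cases h : qws.any (fun w => PySem.Str.isIn w (PySem.Str.lower line)) = true
    · simp only [h, if_pos]
      rw [ih (a1 ++ [line]) (a2 ++ [PySem.Str.lower line]),
        @List.filter_cons_of_pos String (fun line => qws.any fun w => PySem.Str.isIn w (PySem.Str.lower line)) line rest h]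
      simp
    · simp only [Bool.not_eq_true] at h
      have hn : ¬ ((fun line => qws.any fun w => PySem.Str.isIn w (PySem.Str.lower line)) line = true) := by
        rw [List.any_eq_false] at h
        simp only [Bool.not_eq_true]
        simpa using h
      simp only [h, Bool.false_eq_true, if_false, ih]
      rw [@List.filter_cons_of_neg String (fun line => qws.any fun w => PySem.Str.isIn w (PySem.Str.lower line)) line rest hn]

theorem pv_matches_eq (qws : List String) (hq : ∀ w ∈ qws, ∀ c ∈ w.toList, PySem.Chars.isspace c = false)
    (text : String) :
    qws.filter (fun w => PySem.Str.isIn w (PySem.Str.lower text)) =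
    qws.filter (fun w =>
      (((PySem.Chars.splitOn text.toList ['\n']).map String.ofList).filter
        (fun line => qws.any (fun w' => PySem.Str.isIn w' (PySem.Str.lower line)))).map PySem.Str.lower
        |>.any (fun ll => PySem.Str.isIn w ll)) := by
  apply List.filter_congr
  intro w hwq
  have hiff := pv_word_in_doc_iff w text (hq w hwq)
  rw [Bool.eq_iff_iff, hiff]
  rw [List.any_eq_true]
  constructor
  · rintro ⟨line, hline, hin⟩
    refine ⟨PySem.Str.lower line, List.mem_map_of_mem ?_, hin⟩
    exact List.mem_filter.mpr ⟨hline, List.any_eq_true.mpr ⟨w, hwq, hin⟩⟩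
  · rintro ⟨ll, hll, hin⟩
    obtain ⟨line, hline, rfl⟩ := List.mem_map.mp hll
    exact ⟨line, (List.mem_filter.mp hline).1, hin⟩

theorem pv_guard_iff (qws : List String) (hq : ∀ w ∈ qws, ∀ c ∈ w.toList, PySem.Chars.isspace c = false)
    (text : String) :
    (0 < ((qws.filter (fun w => PySem.Str.isIn w (PySem.Str.lower text))).map (fun _ => (1 : Int))).sum ↔
      ((PySem.Chars.splitOn text.toList ['\n']).map String.ofList).filter
        (fun line => qws.any (fun w' => PySem.Str.isIn w' (PySem.Str.lower line))) ≠ []) := by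
  rw [PySem.List.sum_map_const_int, mul_one]
  have h0 : (0 : Int) < ((qws.filter (fun w => PySem.Str.isIn w (PySem.Str.lower text))).length : Int) ↔
      qws.filter (fun w => PySem.Str.isIn w (PySem.Str.lower text)) ≠ [] := by
    rw [Int.natCast_pos, List.length_pos_iff_ne_nil]
  rw [h0, pv_matches_eq qws hq text]
  constructor
  · intro hne
    obtain ⟨w, hw⟩ := List.exists_mem_of_ne_nil _ hne
    obtain ⟨hwq, hpred⟩ := List.mem_filter.mp hw
    simp only [List.any_eq_true, List.mem_map] at hpred
    obtain ⟨ll, ⟨line, hline, rfl⟩, _⟩ := hpred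
    exact List.ne_nil_of_mem hline
  · intro hR
    obtain ⟨line, hline⟩ := List.exists_mem_of_ne_nil _ hR
    have hP := (List.mem_filter.mp hline).2
    simp only [List.any_eq_true] at hP
    obtain ⟨w, hwq, hin⟩ := hP
    refine List.ne_nil_of_mem (List.mem_filter.mpr ⟨hwq, ?_⟩)
    simp only [List.any_eq_true, List.mem_map]
    exact ⟨PySem.Str.lower line, ⟨line, hline, rfl⟩, by simpa using hin⟩

theorem pv_ordered_eq (rs : List (String × String × Int)) :
    (PySem.List.sorted (PySem.Set.ofList (rs.map (fun r => r.2.2))) (fun m => m) true).foldl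
      (fun ordered m => ordered ++ rs.filter (fun r => r.2.2 == m)) [] =
    PySem.List.sorted rs (fun x => x.2.2) true := by
  rw [PySem.List.foldl_append_eq_flatMap]
  rw [List.nil_append]
  apply pv_bucket_sort
  · have h1 := PySem.List.sorted_pairwise_rev (PySem.Set.ofList (rs.map (fun r => r.2.2))) (fun m => m)
    have h2 : (PySem.List.sorted (PySem.Set.ofList (rs.map (fun r => r.2.2))) (fun m => m) true).Nodup :=
      ((PySem.List.sorted_perm _ _ _).nodup_iff).mpr (PySem.Set.nodup_ofList _)
    exact (h2.imp₂ (fun a b hne hle => lt_of_le_of_ne hle (Ne.symm hne)) h1)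
  · intro x hx
    rw [PySem.List.mem_sorted]
    exact (PySem.Set.mem_ofList _ _).mpr (List.mem_map_of_mem hx)

theorem pv_step_eq (qws : List String)
    (hq : ∀ w ∈ qws, ∀ c ∈ w.toList, PySem.Chars.isspace c = false) :
    (fun (results : List (String × String × Int)) (p : String × String) =>
      let doc_lower := PySem.Str.lower p.2
      let nmatches := ((qws.filter (fun word => PySem.Str.isIn word doc_lower)).map
        (fun _ => (1 : Int))).sum
      if 0 < nmatches then
        let lines := (PySem.Chars.splitOn p.2.toList ['\n']).map String.ofList
        let relevant_lines := lines.filter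
          (fun line => qws.any (fun word => PySem.Str.isIn word (PySem.Str.lower line)))
        if relevant_lines.isEmpty then results
        else results ++ [(p.1,
          PySem.Str.slice (PySem.Str.join " " (PySem.List.slice relevant_lines none (some 3))) none (some 300),
          nmatches)]
      else results) =
    (fun results p =>
      let rl := ((PySem.Chars.splitOn p.2.toList ['\n']).map String.ofList).foldl
        (fun rl line =>
          let ll := PySem.Str.lower line
          if qws.any (fun w => PySem.Str.isIn w ll) then (rl.1 ++ [line], rl.2 ++ [ll])
          else rl)
        ([], [])
      if rl.1.isEmpty then results
      else
        let nmatches := ((qws.filter (fun w => rl.2.any (fun ll => PySem.Str.isIn w ll))).map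
          (fun _ => (1 : Int))).sum
        results ++ [(p.1,
          PySem.Str.slice (PySem.Str.join " " (PySem.List.slice rl.1 none (some 3))) none (some 300),
          nmatches)]) := by
  funext results p
  simp only [pv_relfold qws _ [] []]
  simp only [List.nil_append]
  set R := ((PySem.Chars.splitOn p.2.toList ['\n']).map String.ofList).filter
    (fun line => qws.any (fun w => PySem.Str.isIn w (PySem.Str.lower line))) with hR
  by_cases hRnil : R = []
  · simp [hRnil]
  · have hguard := (pv_guard_iff qws hq p.2).mpr (by rw [← hR]; exact hRnil)
    simp only [if_pos hguard]
    have hne : R.isEmpty = false := by simpa [List.isEmpty_iff] using hRnil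
    rw [hne]
    simp only [Bool.false_eq_true, if_false]
    congr 2
    rw [← pv_matches_eq qws hq p.2]


-- ===== VERDICT (by name: the statement is the Claim_ definition above) =====
theorem keyword_search_spec : Claim_equal_keyword_search := by
  intro query documents limit _
  unfold Spec_keyword_search
  have hq : ∀ w ∈ PySem.Str.split₀ (PySem.Str.lower query), ∀ c ∈ w.toList,
      PySem.Chars.isspace c = false := by
    intro w hw c hc
    unfold PySem.Str.split₀ at hw
    obtain ⟨l, hl, rfl⟩ := List.mem_map.mp hw
    rw [String.toList_ofList] at hc
    exact pv_split₀_no_space _ l hl c hc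
  simp only [keyword_search, keyword_search_alt]
  rw [pv_step_eq _ hq]
  set items := (PySem.Dict.ofList documents).items with hitems
  by_cases hempty : items.isEmpty
  · have : items = [] := List.isEmpty_iff.mp hempty
    simp [this]
  · rw [if_neg (by simp [hempty])]
    set rs := items.foldl (fun results p =>
      let rl := ((PySem.Chars.splitOn p.2.toList ['\n']).map String.ofList).foldl
        (fun rl line =>
          let ll := PySem.Str.lower line
          if (PySem.Str.split₀ (PySem.Str.lower query)).any (fun w => PySem.Str.isIn w ll) then
            (rl.1 ++ [line], rl.2 ++ [ll])
          else rl)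
        ([], [])
      if rl.1.isEmpty then results
      else
        let nmatches := (((PySem.Str.split₀ (PySem.Str.lower query)).filter
          (fun w => rl.2.any (fun ll => PySem.Str.isIn w ll))).map (fun _ => (1 : Int))).sum
        results ++ [(p.1,
          PySem.Str.slice (PySem.Str.join " " (PySem.List.slice rl.1 none (some 3))) none (some 300),
          nmatches)]) [] with hrs
    rw [pv_ordered_eq rs]
    have hiff : (PySem.List.sorted rs (fun x => x.2.2) true).isEmpty = rs.isEmpty := by
      rw [Bool.eq_iff_iff, List.isEmpty_iff, List.isEmpty_iff, PySem.List.sorted_eq_nil_iff]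
    rw [hiff]
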